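-- pv_equiv track=rewrite | github.com/sungitly/ddcode | commfootsteps.py | common_foot_steps
-- ===== SOURCE A (Python) =====
-- def common_foot_steps(father_pos: int, martin_pos: int, vel_father: int, father_steps: int) -> tuple:
--     common_steps = 0  # F
--     vel_martin = 0  # V2
--
--     for i in range(father_steps + 1):
--         temp_common_steps = 0
--         temp_vel_martin = father_pos - martin_pos + vel_father * i
--
--         if temp_vel_martin == 0:
--             continue
--
--         for j in range(i, father_steps + 1):
--             if (father_pos - martin_pos + vel_father * j) % temp_vel_martin == 0:
--                 temp_common_steps = temp_common_steps + 1
--         if common_steps <= temp_common_steps: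
--             common_steps = temp_common_steps
--             vel_martin = temp_vel_martin
--     return common_steps, vel_martin
-- ===== SOURCE B (Python) =====
-- def _gcd(a, b):
--     # Euclid's algorithm for nonnegative integers.
--     while b:
--         a, b = b, a % b
--     return a
--
--
-- def common_foot_steps(father_pos: int, martin_pos: int, vel_father: int, father_steps: int) -> tuple:
--     # Same selection loop, but each candidate's count is computed in O(log V)
--     # by a closed form instead of scanning all later steps:
--     # v divides d + vel_father*j  (j >= i)  iff  m divides j - i,
--     # where m = |v| // gcd(|v|, |vel_father|); there are (father_steps-i)//m + 1 such j.
--     d = father_pos - martin_pos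
--     common_steps = 0
--     vel_martin = 0
--     for i in range(father_steps + 1):
--         v = d + vel_father * i
--         if v == 0:
--             continue
--         m = abs(v) // _gcd(abs(v), abs(vel_father))
--         cnt = (father_steps - i) // m + 1
--         if common_steps <= cnt:
--             common_steps = cnt
--             vel_martin = v
--     return common_steps, vel_martin
-- ===== Notes on version B (the rewrite author's own statement) =====
-- stated objective: faster
-- what changed: The inner scan over all later steps is replaced by a gcd-based closed form: for each candidate velocity v the count of divisible positions is (father_steps - i) // (|v| // gcd(|v|, |vel_father|)) + 1, turning the O(n^2) double loop into a single O(n log V) pass.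
import Mathlib
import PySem

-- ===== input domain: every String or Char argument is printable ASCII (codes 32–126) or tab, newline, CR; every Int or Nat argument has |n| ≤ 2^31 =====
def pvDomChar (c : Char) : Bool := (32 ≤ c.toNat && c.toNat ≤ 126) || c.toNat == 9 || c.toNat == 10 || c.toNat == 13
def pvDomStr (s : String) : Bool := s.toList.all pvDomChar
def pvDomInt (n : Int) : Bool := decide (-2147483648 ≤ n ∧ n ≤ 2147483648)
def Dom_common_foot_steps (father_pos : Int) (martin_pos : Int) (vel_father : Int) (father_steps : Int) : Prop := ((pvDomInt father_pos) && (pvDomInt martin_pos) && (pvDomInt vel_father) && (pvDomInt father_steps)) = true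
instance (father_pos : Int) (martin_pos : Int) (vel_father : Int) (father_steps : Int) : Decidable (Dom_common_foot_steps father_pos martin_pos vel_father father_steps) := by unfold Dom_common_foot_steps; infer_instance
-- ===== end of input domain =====

-- B replaces the inner O(n) scan of A by a gcd-based closed form for the count
-- of divisible positions, making the whole computation one pass (objective: faster).

-- ===== PORT A =====
def common_foot_steps (father_pos : Int) (martin_pos : Int) (vel_father : Int) (father_steps : Int) : List Int :=
  let r := (PySem.List.pyRange 0 (father_steps + 1) 1).foldl
    (fun (st : Int × Int) i =>
      let temp_vel_martin := father_pos - martin_pos + vel_father * i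
      if temp_vel_martin = 0 then st
      else
        let temp_common_steps := (PySem.List.pyRange i (father_steps + 1) 1).foldl
          (fun c j =>
            if PySem.Int.mod (father_pos - martin_pos + vel_father * j) temp_vel_martin = 0
            then c + 1 else c) (0 : Int)
        if st.1 ≤ temp_common_steps then (temp_common_steps, temp_vel_martin) else st)
    ((0 : Int), (0 : Int))
  [r.1, r.2]

-- ===== PORT B =====
-- Euclid's gcd on nonnegative integers, as hand-written in Source B.
def bGcd (a b : Nat) : Nat :=
  if _h : b = 0 then a else bGcd b (a % b)
termination_by b
decreasing_by exact Nat.mod_lt a (Nat.pos_of_ne_zero _h)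

def common_foot_steps_alt (father_pos : Int) (martin_pos : Int) (vel_father : Int) (father_steps : Int) : List Int :=
  let d := father_pos - martin_pos
  let r := (PySem.List.pyRange 0 (father_steps + 1) 1).foldl
    (fun (st : Int × Int) i =>
      let v := d + vel_father * i
      if v = 0 then st
      else
        let m : Int := ((v.natAbs / bGcd v.natAbs vel_father.natAbs : Nat) : Int)
        let cnt := PySem.Int.floordiv (father_steps - i) m + 1
        if st.1 ≤ cnt then (cnt, v) else st)
    ((0 : Int), (0 : Int))
  [r.1, r.2]

-- ===== PRECONDITION & SPEC =====
def Spec_common_foot_steps (father_pos : Int) (martin_pos : Int) (vel_father : Int) (father_steps : Int) (out : List Int) : Prop := out = common_foot_steps_alt father_pos martin_pos vel_father father_steps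
instance (father_pos : Int) (martin_pos : Int) (vel_father : Int) (father_steps : Int) (out : List Int) : Decidable (Spec_common_foot_steps father_pos martin_pos vel_father father_steps out) := by unfold Spec_common_foot_steps; infer_instance

-- ===== CLAIM (what is proved, stated in full; the proofs are below) =====
def Claim_equal_common_foot_steps : Prop := ∀ (father_pos : Int) (martin_pos : Int) (vel_father : Int) (father_steps : Int), Dom_common_foot_steps father_pos martin_pos vel_father father_steps → Spec_common_foot_steps father_pos martin_pos vel_father father_steps (common_foot_steps father_pos martin_pos vel_father father_steps)

-- ===== LEMMAS AND PROOFS =====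

theorem bGcd_eq : ∀ b a : Nat, bGcd a b = Nat.gcd b a := by
  intro b
  induction b using Nat.strong_induction_on with
  | _ b ih =>
    intro a
    rw [bGcd]
    by_cases h : b = 0
    · simp [h]
    · rw [dif_neg h, ih (a % b) (Nat.mod_lt a (Nat.pos_of_ne_zero h))]
      exact (Nat.gcd_rec b a).symm

theorem div_gcd_dvd_iff (A B k : Nat) (hA : 0 < A) :
    (A ∣ B * k ↔ A / Nat.gcd A B ∣ k) := by
  rw [Nat.div_dvd_iff_dvd_mul (Nat.gcd_dvd_left A B) (Nat.gcd_pos_of_pos_left B hA),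
      ← Nat.gcd_mul_right, Nat.dvd_gcd_iff]
  simp

theorem count_multiples (m : Nat) (hm : 0 < m) :
    ∀ N : Nat, (List.range (N + 1)).countP (fun k => decide (m ∣ k)) = N / m + 1 := by
  intro N
  induction N with
  | zero => simp [List.range_succ, Nat.div_eq_of_lt hm]
  | succ N ih =>
    rw [List.range_succ, List.countP_append, ih, Nat.succ_div]
    by_cases h : m ∣ N + 1 <;> simp [h]

-- the count A computes for candidate velocity v at step i equals B's closed form
theorem inner_count (d vf n i : Int) (hi : i ≤ n) (hv : d + vf * i ≠ 0) :
    (PySem.List.pyRange i (n + 1) 1).foldl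
      (fun c j => if PySem.Int.mod (d + vf * j) (d + vf * i) = 0 then c + 1 else c) (0 : Int)
    = PySem.Int.floordiv (n - i)
        (((d + vf * i).natAbs / bGcd (d + vf * i).natAbs vf.natAbs : Nat) : Int) + 1 := by
  set v := d + vf * i with hvdef
  set m : Nat := v.natAbs / bGcd v.natAbs vf.natAbs with hmdef
  have hA : 0 < v.natAbs := Int.natAbs_pos.mpr hv
  have hm : 0 < m := by
    rw [hmdef, bGcd_eq, Nat.gcd_comm]
    exact Nat.div_pos (Nat.le_of_dvd hA (Nat.gcd_dvd_left _ _)) (Nat.gcd_pos_of_pos_left _ hA)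
  set N : Nat := (n - i).toNat with hNdef
  have hni : n - i = (N : Int) := by rw [hNdef]; omega
  have hrange : n + 1 - i = ((N + 1 : Nat) : Int) := by omega
  rw [PySem.List.foldl_ite_add_one, PySem.List.pyRange_one, hrange, Int.toNat_natCast,
      List.countP_map]
  have hfun : ((fun x => decide (PySem.Int.mod (d + vf * x) v = 0)) ∘ (fun k : Nat => i + (k : Int)))
      = (fun k : Nat => decide (m ∣ k)) := by
    funext k
    simp only [Function.comp_apply, decide_eq_decide]
    have h2 : d + vf * (i + (k : Int)) = v + vf * (k : Int) := by rw [hvdef]; ring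
    rw [h2, PySem.Int.mod_eq_zero_iff_dvd, dvd_add_right (dvd_refl v),
        ← Int.natAbs_dvd_natAbs, Int.natAbs_mul, Int.natAbs_natCast,
        hmdef, bGcd_eq, Nat.gcd_comm]
    exact div_gcd_dvd_iff v.natAbs vf.natAbs k hA
  rw [hfun, count_multiples m hm N, hni, PySem.Int.floordiv_natCast]
  push_cast
  ring

theorem folds_eq (fp mp vf n : Int) :
    (PySem.List.pyRange 0 (n + 1) 1).foldl
      (fun (st : Int × Int) i =>
        let temp_vel_martin := fp - mp + vf * i
        if temp_vel_martin = 0 then st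
        else
          let temp_common_steps := (PySem.List.pyRange i (n + 1) 1).foldl
            (fun c j => if PySem.Int.mod (fp - mp + vf * j) temp_vel_martin = 0 then c + 1 else c) (0 : Int)
          if st.1 ≤ temp_common_steps then (temp_common_steps, temp_vel_martin) else st)
      ((0 : Int), (0 : Int))
    = (PySem.List.pyRange 0 (n + 1) 1).foldl
      (fun (st : Int × Int) i =>
        let v := (fp - mp) + vf * i
        if v = 0 then st
        else
          let m : Int := ((v.natAbs / bGcd v.natAbs vf.natAbs : Nat) : Int)
          let cnt := PySem.Int.floordiv (n - i) m + 1
          if st.1 ≤ cnt then (cnt, v) else st)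
      ((0 : Int), (0 : Int)) := by
  apply PySem.List.foldl_congr_mem
  intro st i hi
  have hmem := (PySem.List.mem_pyRange_one).mp hi
  have hile : i ≤ n := by omega
  simp only []
  by_cases hv : fp - mp + vf * i = 0
  · simp [hv]
  · rw [if_neg hv, if_neg hv, inner_count (fp - mp) vf n i hile hv]

-- ===== VERDICT (by name: the statement is the Claim_ definition above) =====
theorem common_foot_steps_spec : Claim_equal_common_foot_steps := by
  intro fp mp vf n _
  unfold Spec_common_foot_steps common_foot_steps common_foot_steps_alt
  rw [folds_eq]
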